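-- pv_equiv track=rewrite | github.com/abhinav-gautam/leetcode | Weekly Contest/469/Q3. Number of ZigZag Arrays I.py | zigZagArrays
-- ===== SOURCE A (Python) =====
-- def zigZagArrays(n: int, l: int, r: int) -> int:
--     MOD = 10**9 + 7
--     m = r - l + 1
--
--     dp_up = [0] * m
--     dp_down = [0] * m
--
--     for i in range(m):
--         for j in range(m):
--             if i < j:
--                 dp_up[j] = (dp_up[j] + 1) % MOD
--             elif i > j:
--                 dp_down[j] = (dp_down[j] + 1) % MOD
--
--     for length in range(3, n + 1):
--         new_up = [0] * m
--         new_down = [0] * m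
--
--         prefix_up = [0] * (m + 1)
--         prefix_down = [0] * (m + 1)
--         for j in range(m):
--             prefix_up[j + 1] = (prefix_up[j] + dp_up[j]) % MOD
--             prefix_down[j + 1] = (prefix_down[j] + dp_down[j]) % MOD
--
--         for j in range(m):
--             if dp_up[j]:
--                 new_down[:j] = [(new_down[x] + dp_up[j]) % MOD for x in range(j)]
--
--             if dp_down[j]:
--                 new_up[j + 1 :] = [
--                     (new_up[x] + dp_down[j]) % MOD for x in range(j + 1, m)
--                 ]
--
--         dp_up, dp_down = new_up, new_down
--
--     return (sum(dp_up) + sum(dp_down)) % MOD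
-- ===== SOURCE B (Python) =====
-- def zigZagArrays(n: int, l: int, r: int) -> int:
--     # same DP, but: base counts in closed form, transitions via prefix/suffix running sums
--     MOD = 10**9 + 7
--     m = r - l + 1
--     dp_up = [j % MOD for j in range(m)]
--     dp_down = [(m - 1 - j) % MOD for j in range(m)]
--
--     for _ in range(3, n + 1):
--         new_up = [0] * m
--         new_down = [0] * m
--         s = 0
--         for j in range(m):
--             new_up[j] = s
--             s = (s + dp_down[j]) % MOD
--         s = 0
--         for j in range(m - 1, -1, -1):
--             new_down[j] = s
--             s = (s + dp_up[j]) % MOD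
--         dp_up, dp_down = new_up, new_down
--
--     return (sum(dp_up) + sum(dp_down)) % MOD
-- ===== Notes on version B (the rewrite author's own statement) =====
-- stated objective: alternative
-- what changed: Replaces A's O(m^2) pairwise-counting initialisation and O(m^2) per-step slice-update transition by closed-form base counts and single-pass prefix/suffix running-sum scans for the DP transition.
import Mathlib
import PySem

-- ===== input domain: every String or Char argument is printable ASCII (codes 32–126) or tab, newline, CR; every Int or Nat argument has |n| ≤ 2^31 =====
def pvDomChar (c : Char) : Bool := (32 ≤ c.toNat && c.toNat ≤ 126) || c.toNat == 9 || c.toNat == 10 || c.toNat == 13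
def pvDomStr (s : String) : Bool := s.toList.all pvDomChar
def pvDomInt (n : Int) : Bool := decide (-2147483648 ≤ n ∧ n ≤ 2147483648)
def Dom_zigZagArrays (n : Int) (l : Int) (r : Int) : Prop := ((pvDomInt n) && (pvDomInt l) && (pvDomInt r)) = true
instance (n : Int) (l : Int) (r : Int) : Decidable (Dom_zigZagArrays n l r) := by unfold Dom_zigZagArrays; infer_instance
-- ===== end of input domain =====

-- B computes the same DP with closed-form base counts and single-pass prefix/suffix running-sum
-- transitions instead of A's per-index pairwise scans and slice updates (objective: alternative).

-- ===== PORT A =====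
-- Literal transliteration of A. range(m)/range(j+1, m) are ported as List.range/List.range'
-- over Nat (exact: all Python loop indices here are the nonnegative ints 0..m-1, empty when m <= 0);
-- [0]*m is List.replicate m.toNat 0 (exact, empty for m <= 0); list indexing dp[j]/slice
-- assignment l[:j]= / l[j+1:]= are ported step for step with getD/set/take/drop/map (every index
-- accessed is in range); Python's % on the positive modulus 10**9+7 with nonnegative operands is
-- Int.emod (exact); `if dp_up[j]:` truthiness is `≠ 0`; range(3, n+1) has (n-2) iterations and its
-- loop variable is unused, so it is ported as a fold over List.range (n-2).toNat.
def zigZagArrays (n : Int) (l : Int) (r : Int) : Int :=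
  let M : Int := 1000000007
  let m : Int := r - l + 1
  let mN : Nat := m.toNat
  let init : List Int × List Int :=
    (List.range mN).foldl (fun st i =>
      (List.range mN).foldl (fun st j =>
        if i < j then (st.1.set j ((st.1.getD j 0 + 1) % M), st.2)
        else if j < i then (st.1, st.2.set j ((st.2.getD j 0 + 1) % M))
        else st) st)
      (List.replicate mN 0, List.replicate mN 0)
  let fin : List Int × List Int :=
    (List.range ((n - 2).toNat)).foldl (fun st _ =>
      (List.range mN).foldl (fun st2 j =>
        let nd := if st.1.getD j 0 ≠ 0 then
            (List.range j).map (fun x => (st2.2.getD x 0 + st.1.getD j 0) % M) ++ st2.2.drop j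
          else st2.2
        let nu := if st.2.getD j 0 ≠ 0 then
            st2.1.take (j+1) ++ (List.range' (j+1) (mN - (j+1))).map (fun x => (st2.1.getD x 0 + st.2.getD j 0) % M)
          else st2.1
        (nu, nd))
        (List.replicate mN 0, List.replicate mN 0)) init
  (fin.1.sum + fin.2.sum) % M

-- ===== PORT B =====
-- B-side helpers: pvPreScan = B's forward running-sum loop (new_up), pvSufScan = B's backward
-- running-sum loop (new_down, also returning the final accumulator), exactly as in Source B.
def pvPreScan (M : Int) (s : Int) : List Int → List Int
  | [] => []
  | a :: t => s :: pvPreScan M ((s + a) % M) t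

def pvSufScan (M : Int) : List Int → List Int × Int
  | [] => ([], 0)
  | a :: t =>
    let p := pvSufScan M t
    (p.2 :: p.1, (p.2 + a) % M)

def zigZagArrays_alt (n : Int) (l : Int) (r : Int) : Int :=
  let M : Int := 1000000007
  let m : Int := r - l + 1
  let mN : Nat := m.toNat
  let up0 : List Int := (List.range mN).map (fun j : Nat => (j : Int) % M)
  let dn0 : List Int := (List.range mN).map (fun j : Nat => (m - 1 - (j : Int)) % M)
  let fin := (List.range ((n - 2).toNat)).foldl (fun st _ =>
      (pvPreScan M 0 st.2, (pvSufScan M st.1).1)) (up0, dn0)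
  (fin.1.sum + fin.2.sum) % M



-- ===== PRECONDITION & SPEC =====
def Spec_zigZagArrays (n : Int) (l : Int) (r : Int) (out : Int) : Prop := out = zigZagArrays_alt n l r
instance (n : Int) (l : Int) (r : Int) (out : Int) : Decidable (Spec_zigZagArrays n l r out) := by unfold Spec_zigZagArrays; infer_instance

-- ===== CLAIM (what is proved, stated in full; the proofs are below) =====
def Claim_equal_zigZagArrays : Prop := ∀ (n : Int) (l : Int) (r : Int), Dom_zigZagArrays n l r → Spec_zigZagArrays n l r (zigZagArrays n l r)

-- ===== LEMMAS AND PROOFS =====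

theorem mr_set (mN k : Nat) (F : Nat → Int) (v : Int) (hk : k < mN) :
    ((List.range mN).map F).set k v = (List.range mN).map (fun j => if j = k then v else F j) := by
  apply List.ext_getElem
  · simp
  · intro i h1 h2
    rcases eq_or_ne i k with rfl | h
    · simp
    · simp [h, Ne.symm h]

theorem mr_getD (mN k : Nat) (F : Nat → Int) (hk : k < mN) :
    ((List.range mN).map F).getD k 0 = F k := by
  rw [List.getD_eq_getElem _ _ (by simpa using hk)]
  simp

theorem mr_prefix (mN k : Nat) (F G : Nat → Int) (hk : k ≤ mN) :
    (List.range k).map G ++ ((List.range mN).map F).drop k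
      = (List.range mN).map (fun j => if j < k then G j else F j) := by
  apply List.ext_getElem
  · simp; omega
  · intro i hi _
    simp only [List.length_append, List.length_map, List.length_range, List.length_drop] at hi
    by_cases h : i < k
    · rw [List.getElem_append_left (by simpa using h)]
      simp [h]
    · rw [List.getElem_append_right (by simpa using h)]
      simp only [List.getElem_drop, List.getElem_map, List.getElem_range, List.length_map,
        List.length_range]
      rw [if_neg (by omega)]
      congr 1; omega

theorem mr_suffix (mN k : Nat) (F G : Nat → Int) (hk : k ≤ mN) :
    ((List.range mN).map F).take k ++ (List.range' k (mN - k)).map G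
      = (List.range mN).map (fun j => if j < k then F j else G j) := by
  apply List.ext_getElem
  · simp; omega
  · intro i hi _
    simp only [List.length_append, List.length_take, List.length_map, List.length_range] at hi
    by_cases h : i < k
    · rw [List.getElem_append_left (by simp; omega)]
      simp [h]
    · rw [List.getElem_append_right (by simp; omega)]
      simp only [List.length_take, List.length_map, List.length_range, List.getElem_map,
        List.getElem_range', List.getElem_range]
      rw [if_neg (by omega)]
      congr 1; omega

theorem mr_replicate (mN : Nat) : (List.replicate mN (0:Int)) = (List.range mN).map (fun _ => 0) := by
  rw [List.map_const']; simp

theorem sum_range'_map (f : Nat → Int) (a n : Nat) :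
    ((List.range' a n).map f).sum = ∑ i ∈ Finset.Ico a (a + n), f i := by
  induction n generalizing a with
  | zero => simp
  | succ n ih =>
    rw [List.range'_succ, List.map_cons, List.sum_cons, ih (a+1)]
    have h2 : a + (n + 1) = (a + 1) + n := by omega
    rw [h2]
    exact (Finset.sum_eq_sum_Ico_succ_bot (by omega) f).symm

theorem sum_range_map (f : Nat → Int) (n : Nat) :
    ((List.range n).map f).sum = ∑ i ∈ Finset.Ico 0 n, f i := by
  rw [List.range_eq_range', sum_range'_map]
  simp

theorem drop_range (n x : Nat) : (List.range n).drop x = List.range' x (n - x) := by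
  apply List.ext_getElem
  · simp
  · intro i h1 h2
    simp only [List.getElem_drop, List.getElem_range, List.getElem_range']
    omega

theorem preScan_char (M : Int) (xs : List Int) (s : Int) (hs : s % M = s) :
    pvPreScan M s xs = (List.range xs.length).map (fun x => (s + (xs.take x).sum) % M) := by
  induction xs generalizing s with
  | nil => simp [pvPreScan]
  | cons a t ih =>
    rw [pvPreScan, List.length_cons, List.range_succ_eq_map, List.map_cons, List.map_map]
    rw [ih ((s + a) % M) (Int.emod_emod_of_dvd _ dvd_rfl)]
    congr 1
    · simpa using hs.symm
    · apply List.map_congr_left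
      intro x hx
      simp only [Function.comp_apply, List.take_succ_cons, List.sum_cons]
      rw [Int.emod_add_emod]
      ring_nf

theorem sufScan_char (M : Int) (xs : List Int) :
    pvSufScan M xs
      = ((List.range xs.length).map (fun x => (xs.drop (x + 1)).sum % M), xs.sum % M) := by
  induction xs with
  | nil => simp [pvSufScan]
  | cons a t ih =>
    rw [pvSufScan, ih]
    rw [Prod.mk.injEq]
    constructor
    · rw [List.length_cons, List.range_succ_eq_map, List.map_cons, List.map_map]
      refine List.cons_eq_cons.mpr ⟨by simp, ?_⟩
      apply List.map_congr_left
      intro x hx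
      simp [Function.comp_apply, List.drop_succ_cons]
    · simp only [List.sum_cons]
      rw [Int.emod_add_emod]
      ring_nf

theorem initInnerAux (M : Int) (mN i : Nat) (U D : Nat → Int) :
    ∀ k, k ≤ mN →
    (List.range k).foldl (fun st j =>
        if i < j then (st.1.set j ((st.1.getD j 0 + 1) % M), st.2)
        else if j < i then (st.1, st.2.set j ((st.2.getD j 0 + 1) % M))
        else st)
      ((List.range mN).map U, (List.range mN).map D)
    = ((List.range mN).map (fun j => if j < k ∧ i < j then (U j + 1) % M else U j),
       (List.range mN).map (fun j => if j < k ∧ j < i then (D j + 1) % M else D j)) := by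
  intro k
  induction k with
  | zero => intro _; simp
  | succ k ih =>
    intro hk
    rw [List.range_succ, List.foldl_append, ih (by omega), List.foldl_cons, List.foldl_nil]
    have hkm : k < mN := by omega
    by_cases h1 : i < k
    · rw [if_pos h1, mr_getD mN k _ hkm]
      rw [if_neg (by omega)]
      rw [mr_set mN k _ _ hkm]
      rw [Prod.mk.injEq]
      constructor
      · apply List.map_congr_left
        intro j hj
        rw [List.mem_range] at hj
        split_ifs <;> first | rfl | omega | simp_all
      · apply List.map_congr_left
        intro j hj
        rw [List.mem_range] at hj
        split_ifs <;> first | rfl | omega | simp_all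
    · by_cases h2 : k < i
      · rw [if_neg (by omega), if_pos h2, mr_getD mN k _ hkm]
        rw [if_neg (by omega)]
        rw [mr_set mN k _ _ hkm]
        rw [Prod.mk.injEq]
        constructor
        · apply List.map_congr_left
          intro j hj
          rw [List.mem_range] at hj
          split_ifs <;> first | rfl | omega | simp_all
        · apply List.map_congr_left
          intro j hj
          rw [List.mem_range] at hj
          split_ifs <;> first | rfl | omega | simp_all
      · rw [if_neg (by omega), if_neg (by omega)]
        rw [Prod.mk.injEq]
        constructor
        · apply List.map_congr_left
          intro j hj
          rw [List.mem_range] at hj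
          split_ifs <;> first | rfl | omega | simp_all
        · apply List.map_congr_left
          intro j hj
          rw [List.mem_range] at hj
          split_ifs <;> first | rfl | omega | simp_all

theorem initOuter (M : Int) (mN : Nat) (K : Nat) :
    (List.range K).foldl (fun st i =>
      (List.range mN).foldl (fun st j =>
        if i < j then (st.1.set j ((st.1.getD j 0 + 1) % M), st.2)
        else if j < i then (st.1, st.2.set j ((st.2.getD j 0 + 1) % M))
        else st) st)
      (List.replicate mN 0, List.replicate mN 0)
    = ((List.range mN).map (fun j => ((min K j : Nat) : Int) % M),
       (List.range mN).map (fun j => ((K - min K (j + 1) : Nat) : Int) % M)) := by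
  induction K with
  | zero =>
    rw [mr_replicate]
    simp
  | succ K ih =>
    rw [List.range_succ, List.foldl_append, ih, List.foldl_cons, List.foldl_nil]
    rw [initInnerAux M mN K _ _ mN le_rfl]
    rw [Prod.mk.injEq]
    constructor
    · apply List.map_congr_left
      intro j hj
      rw [List.mem_range] at hj
      by_cases hKj : K < j
      · rw [if_pos ⟨hj, hKj⟩]
        have e1 : min K j = K := by omega
        have e2 : min (K + 1) j = K + 1 := by omega
        rw [e1, e2, Int.emod_add_emod]
        congr 1
      · rw [if_neg (by omega)]
        have e : min K j = min (K + 1) j := by omega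
        rw [e]
    · apply List.map_congr_left
      intro j hj
      rw [List.mem_range] at hj
      by_cases hjK : j < K
      · rw [if_pos ⟨hj, hjK⟩, Int.emod_add_emod]
        congr 1
        have e1 : ((K - min K (j + 1) : Nat) : Int) + 1 = ((K + 1 - min (K + 1) (j + 1) : Nat) : Int) := by omega
        exact e1
      · rw [if_neg (by omega)]
        have e : K - min K (j + 1) = K + 1 - min (K + 1) (j + 1) := by omega
        rw [e]

theorem transAux (M : Int) (mN : Nat) (U D : Nat → Int) :
    ∀ k, k ≤ mN →
    (List.range k).foldl (fun st2 j =>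
        (if ((List.range mN).map D).getD j 0 ≠ 0 then
            st2.1.take (j + 1) ++ (List.range' (j + 1) (mN - (j + 1))).map
              (fun x => (st2.1.getD x 0 + ((List.range mN).map D).getD j 0) % M)
          else st2.1,
         if ((List.range mN).map U).getD j 0 ≠ 0 then
            (List.range j).map (fun x => (st2.2.getD x 0 + ((List.range mN).map U).getD j 0) % M)
              ++ st2.2.drop j
          else st2.2))
      (List.replicate mN 0, List.replicate mN 0)
    = ((List.range mN).map (fun x => (∑ t ∈ Finset.Ico 0 (min x k), D t) % M),
       (List.range mN).map (fun x => (∑ t ∈ Finset.Ico (x + 1) k, U t) % M)) := by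
  intro k
  induction k with
  | zero =>
    intro _
    rw [mr_replicate, Prod.mk.injEq]
    constructor
    · apply List.map_congr_left
      intro x _
      rw [Nat.min_zero, Finset.Ico_self, Finset.sum_empty, Int.zero_emod]
    · apply List.map_congr_left
      intro x _
      rw [Finset.Ico_eq_empty (by omega), Finset.sum_empty, Int.zero_emod]
  | succ k ih =>
    intro hk
    rw [List.range_succ, List.foldl_append, ih (by omega), List.foldl_cons, List.foldl_nil]
    have hkm : k < mN := by omega
    dsimp only
    rw [mr_getD mN k U hkm, mr_getD mN k D hkm]
    rw [Prod.mk.injEq]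
    constructor
    · -- new_up component
      by_cases hD : D k = 0
      · rw [if_neg (not_not_intro hD)]
        apply List.map_congr_left
        intro x hx
        rw [List.mem_range] at hx
        by_cases hxk : x ≤ k
        · have e : min x k = min x (k + 1) := by omega
          rw [e]
        · have e1 : min x k = k := by omega
          have e2 : min x (k + 1) = k + 1 := by omega
          rw [e1, e2, Finset.sum_Ico_succ_top (by omega), hD, add_zero]
      · rw [if_pos hD]
        have hmapmap : (List.range' (k + 1) (mN - (k + 1))).map
              (fun x => ((((List.range mN).map fun x => (∑ t ∈ Finset.Ico 0 (min x k), D t) % M)).getD x 0 + D k) % M)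
            = (List.range' (k + 1) (mN - (k + 1))).map
              (fun x => ((∑ t ∈ Finset.Ico 0 (min x k), D t) % M + D k) % M) := by
          apply List.map_congr_left
          intro x hx
          rw [List.mem_range'_1] at hx
          rw [mr_getD mN x _ (by omega)]
        rw [hmapmap, mr_suffix mN (k + 1) _ _ (by omega)]
        apply List.map_congr_left
        intro x hx
        rw [List.mem_range] at hx
        by_cases hxk : x < k + 1
        · rw [if_pos hxk]
          have e : min x k = min x (k + 1) := by omega
          rw [e]
        · rw [if_neg hxk]
          have e1 : min x k = k := by omega
          have e2 : min x (k + 1) = k + 1 := by omega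
          rw [e1, e2, Int.emod_add_emod, Finset.sum_Ico_succ_top (by omega)]
    · -- new_down component
      by_cases hU : U k = 0
      · rw [if_neg (not_not_intro hU)]
        apply List.map_congr_left
        intro x hx
        rw [List.mem_range] at hx
        by_cases hxk : x + 1 ≤ k
        · rw [Finset.sum_Ico_succ_top (by omega), hU, add_zero]
        · rw [Finset.Ico_eq_empty (by omega), Finset.Ico_eq_empty (by omega)]
      · rw [if_pos hU]
        have hmapmap : (List.range k).map
              (fun x => ((((List.range mN).map fun x => (∑ t ∈ Finset.Ico (x + 1) k, U t) % M)).getD x 0 + U k) % M)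
            = (List.range k).map
              (fun x => ((∑ t ∈ Finset.Ico (x + 1) k, U t) % M + U k) % M) := by
          apply List.map_congr_left
          intro x hx
          rw [List.mem_range] at hx
          rw [mr_getD mN x _ (by omega)]
        rw [hmapmap, mr_prefix mN k _ _ (by omega)]
        apply List.map_congr_left
        intro x hx
        rw [List.mem_range] at hx
        by_cases hxk : x < k
        · rw [if_pos hxk, Int.emod_add_emod, Finset.sum_Ico_succ_top (by omega)]
        · rw [if_neg hxk]
          rw [Finset.Ico_eq_empty (by omega), Finset.Ico_eq_empty (by omega)]

theorem Astep_eq (M : Int) (mN : Nat) (U D : Nat → Int) :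
    (List.range mN).foldl (fun st2 j =>
        (if ((List.range mN).map D).getD j 0 ≠ 0 then
            st2.1.take (j + 1) ++ (List.range' (j + 1) (mN - (j + 1))).map
              (fun x => (st2.1.getD x 0 + ((List.range mN).map D).getD j 0) % M)
          else st2.1,
         if ((List.range mN).map U).getD j 0 ≠ 0 then
            (List.range j).map (fun x => (st2.2.getD x 0 + ((List.range mN).map U).getD j 0) % M)
              ++ st2.2.drop j
          else st2.2))
      (List.replicate mN 0, List.replicate mN 0)
    = ((List.range mN).map (fun x => (∑ t ∈ Finset.Ico 0 x, D t) % M),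
       (List.range mN).map (fun x => (∑ t ∈ Finset.Ico (x + 1) mN, U t) % M)) := by
  rw [transAux M mN U D mN le_rfl, Prod.mk.injEq]
  constructor
  · apply List.map_congr_left
    intro x hx
    rw [List.mem_range] at hx
    have e : min x mN = x := by omega
    rw [e]
  · rfl

theorem Bstep_eq (M : Int) (mN : Nat) (U D : Nat → Int) :
    (pvPreScan M 0 ((List.range mN).map D), (pvSufScan M ((List.range mN).map U)).1)
    = ((List.range mN).map (fun x => (∑ t ∈ Finset.Ico 0 x, D t) % M),
       (List.range mN).map (fun x => (∑ t ∈ Finset.Ico (x + 1) mN, U t) % M)) := by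
  rw [Prod.mk.injEq]
  constructor
  · rw [preScan_char M _ 0 (Int.zero_emod M)]
    rw [List.length_map, List.length_range]
    apply List.map_congr_left
    intro x hx
    rw [List.mem_range] at hx
    rw [← List.map_take, List.take_range]
    have e : min x mN = x := by omega
    rw [e, sum_range_map, zero_add]
  · rw [sufScan_char]
    rw [List.length_map, List.length_range]
    apply List.map_congr_left
    intro x hx
    rw [List.mem_range] at hx
    rw [← List.map_drop, drop_range, sum_range'_map]
    have e : x + 1 + (mN - (x + 1)) = mN := by omega
    rw [e]

theorem loop_eq (M : Int) (mN : Nat) (T : Nat) :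
    ∀ U D : Nat → Int,
    ((List.range T).foldl (fun st _ =>
        (List.range mN).foldl (fun st2 j =>
          (if st.2.getD j 0 ≠ 0 then
              st2.1.take (j + 1) ++ (List.range' (j + 1) (mN - (j + 1))).map
                (fun x => (st2.1.getD x 0 + st.2.getD j 0) % M)
            else st2.1,
           if st.1.getD j 0 ≠ 0 then
              (List.range j).map (fun x => (st2.2.getD x 0 + st.1.getD j 0) % M) ++ st2.2.drop j
            else st2.2))
        (List.replicate mN 0, List.replicate mN 0))
      ((List.range mN).map U, (List.range mN).map D)
      = (List.range T).foldl (fun st _ => (pvPreScan M 0 st.2, (pvSufScan M st.1).1))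
          ((List.range mN).map U, (List.range mN).map D))
    ∧ ∃ U' D' : Nat → Int,
        (List.range T).foldl (fun st _ => (pvPreScan M 0 st.2, (pvSufScan M st.1).1))
          ((List.range mN).map U, (List.range mN).map D)
        = ((List.range mN).map U', (List.range mN).map D') := by
  induction T with
  | zero => exact fun U D => ⟨rfl, U, D, rfl⟩
  | succ T ih =>
    intro U D
    obtain ⟨heq, U', D', hB⟩ := ih U D
    rw [List.range_succ, List.foldl_append, List.foldl_append, List.foldl_cons, List.foldl_cons,
      List.foldl_nil, List.foldl_nil, heq, hB]
    dsimp only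
    constructor
    · rw [Astep_eq, Bstep_eq]
    · exact ⟨_, _, Bstep_eq M mN U' D'⟩

theorem zig_eq (n l r : Int) : zigZagArrays n l r = zigZagArrays_alt n l r := by
  unfold zigZagArrays zigZagArrays_alt
  dsimp only
  rw [initOuter 1000000007 ((r - l + 1).toNat) ((r - l + 1).toNat)]
  have hm1 : ((List.range (r - l + 1).toNat).map fun j =>
        ((min (r - l + 1).toNat j : Nat) : Int) % 1000000007)
      = (List.range (r - l + 1).toNat).map (fun j : Nat => (j : Int) % 1000000007) := by
    apply List.map_congr_left
    intro j hj
    rw [List.mem_range] at hj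
    have e : min (r - l + 1).toNat j = j := by omega
    rw [e]
  have hm2 : ((List.range (r - l + 1).toNat).map fun j =>
        (((r - l + 1).toNat - min (r - l + 1).toNat (j + 1) : Nat) : Int) % 1000000007)
      = (List.range (r - l + 1).toNat).map (fun j : Nat => (r - l + 1 - 1 - (j : Int)) % 1000000007) := by
    apply List.map_congr_left
    intro j hj
    rw [List.mem_range] at hj
    congr 1
    omega
  rw [hm1, hm2]
  rw [(loop_eq 1000000007 ((r - l + 1).toNat) ((n - 2).toNat) _ _).1]

-- ===== VERDICT (by name: the statement is the Claim_ definition above) =====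
theorem zigZagArrays_spec : Claim_equal_zigZagArrays := by
  intro n l r _
  unfold Spec_zigZagArrays
  exact zig_eq n l r
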